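-- pv_equiv track=rewrite | github.com/abstractcubism/reroot-app | app/backend/server.py | _normalize_student_traits
-- ===== SOURCE A (Python) =====
-- from typing import Any, Literal, TypedDict, cast
--
-- def _fix_mojibake(text: str) -> str:
--     if "â" not in text:
--         return text
--     try:
--         return text.encode("latin-1").decode("utf-8")
--     except UnicodeError:
--         return text
--
-- def _clean_text(value: Any) -> str:
--     if value is None:
--         return ""
--     return _fix_mojibake(str(value).strip())
--
-- def _normalize_student_traits(raw_traits: list[Any], noise_preference: str) -> list[str]:
--     inferred: set[str] = set()
--
--     for raw_trait in raw_traits: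
--         trait = _clean_text(raw_trait).lower()
--         if not trait:
--             continue
--         if any(token in trait for token in ["clean", "tidy", "chore"]):
--             inferred.add("clean")
--         if any(token in trait for token in ["quiet", "study", "weeknight"]):
--             inferred.add("quiet")
--         if any(token in trait for token in ["social", "music-friendly", "outgoing"]):
--             inferred.add("social")
--         if any(token in trait for token in ["respect", "privacy"]):
--             inferred.add("respectful")
--         if any(token in trait for token in ["organ", "communicat", "budget"]):
--             inferred.add("organized")
--         if any(token in trait for token in ["friendly", "easy"]):
--             inferred.add("friendly")
--
--     noise = noise_preference.strip().lower()
--     if noise == "quiet":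
--         inferred.add("quiet")
--     if noise == "social":
--         inferred.add("social")
--
--     if not inferred:
--         inferred.add("friendly")
--
--     preferred_order = [
--         "clean",
--         "quiet",
--         "organized",
--         "friendly",
--         "social",
--         "respectful",
--         "early-riser",
--         "night-owl",
--     ]
--     return [trait for trait in preferred_order if trait in inferred]
-- ===== SOURCE B (Python) =====
-- _RULES = [
--     ("clean", ("clean", "tidy", "chore")),
--     ("quiet", ("quiet", "study", "weeknight")),
--     ("organized", ("organ", "communicat", "budget")),
--     ("friendly", ("friendly", "easy")),
--     ("social", ("social", "music-friendly", "outgoing")),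
--     ("respectful", ("respect", "privacy")),
-- ]
--
--
-- def _normalize_student_traits(raw_traits, noise_preference):
--     traits = [t for t in (str(r).strip().lower() for r in raw_traits) if t]
--     noise = noise_preference.strip().lower()
--     labels = [
--         label
--         for label, tokens in _RULES
--         if any(tok in t for t in traits for tok in tokens)
--         or (noise == label and label in ("quiet", "social"))
--     ]
--     return labels if labels else ["friendly"]
-- ===== Notes on version B (the rewrite author's own statement) =====
-- stated objective: simpler
-- what changed: A's six literal if-branches building an inferred set that is then filtered through a preferred-order list are replaced by one data-driven pass over an ordered rule table that emits the ordered label list directly (no set, no separate order filter).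
import Mathlib
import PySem

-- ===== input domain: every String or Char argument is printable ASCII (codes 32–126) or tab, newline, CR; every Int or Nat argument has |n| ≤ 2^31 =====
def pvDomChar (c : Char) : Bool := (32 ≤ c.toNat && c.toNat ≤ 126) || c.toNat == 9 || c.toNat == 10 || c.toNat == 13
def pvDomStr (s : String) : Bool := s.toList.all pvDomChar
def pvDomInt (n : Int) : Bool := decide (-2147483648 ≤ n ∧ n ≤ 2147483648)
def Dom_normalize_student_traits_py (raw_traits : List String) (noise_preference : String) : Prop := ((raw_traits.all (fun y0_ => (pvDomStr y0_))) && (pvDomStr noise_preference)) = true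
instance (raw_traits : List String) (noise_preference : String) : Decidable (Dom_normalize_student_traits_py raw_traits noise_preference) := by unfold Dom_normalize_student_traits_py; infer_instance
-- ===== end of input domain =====

-- B replaces A's six literal branches + inferred set + final preferred-order filter by one
-- data-driven pass over a rule table, building the ordered label list directly (objective: simpler).

-- ===== PORT A =====
-- A's _clean_text: the mojibake branch fires only when "â" occurs in the text, which is
-- outside the printable-ASCII input domain, so on Dom it is exactly strip.
def pvCleanText (s : String) : String := PySem.Str.strip s

def pvTokAny (toks : List String) (trait : String) : Bool :=
  toks.any (fun tok => PySem.Str.isIn tok trait)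

-- 'if <match> then inferred.add <label> else inferred' — one conditional set-add of A's loop body
def pvCondAdd (s : PySem.Set String) (c : Bool) (x : String) : PySem.Set String :=
  if c then s.add x else s

def pvStepA (inferred : PySem.Set String) (raw_trait : String) : PySem.Set String :=
  let trait := PySem.Str.lower (pvCleanText raw_trait)
  if trait = "" then inferred
  else
    pvCondAdd (pvCondAdd (pvCondAdd (pvCondAdd (pvCondAdd (pvCondAdd inferred
      (pvTokAny ["clean", "tidy", "chore"] trait) "clean")
      (pvTokAny ["quiet", "study", "weeknight"] trait) "quiet")
      (pvTokAny ["social", "music-friendly", "outgoing"] trait) "social")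
      (pvTokAny ["respect", "privacy"] trait) "respectful")
      (pvTokAny ["organ", "communicat", "budget"] trait) "organized")
      (pvTokAny ["friendly", "easy"] trait) "friendly"

def normalize_student_traits_py (raw_traits : List String) (noise_preference : String) : List String :=
  let inferred := raw_traits.foldl pvStepA PySem.Set.empty
  let noise := PySem.Str.lower (PySem.Str.strip noise_preference)
  let inferred := if noise = "quiet" then inferred.add "quiet" else inferred
  let inferred := if noise = "social" then inferred.add "social" else inferred
  let inferred := if inferred = [] then inferred.add "friendly" else inferred
  ["clean", "quiet", "organized", "friendly", "social", "respectful", "early-riser", "night-owl"].filter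
    (fun trait => PySem.Set.contains inferred trait)

-- ===== PORT B =====
def pvRules : List (String × List String) :=
  [("clean", ["clean", "tidy", "chore"]),
   ("quiet", ["quiet", "study", "weeknight"]),
   ("organized", ["organ", "communicat", "budget"]),
   ("friendly", ["friendly", "easy"]),
   ("social", ["social", "music-friendly", "outgoing"]),
   ("respectful", ["respect", "privacy"])]

def normalize_student_traits_py_alt (raw_traits : List String) (noise_preference : String) : List String :=
  let traits := (raw_traits.map (fun r => PySem.Str.lower (PySem.Str.strip r))).filter (fun t => !(t == ""))
  let noise := PySem.Str.lower (PySem.Str.strip noise_preference)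
  let labels := (pvRules.filter (fun rule =>
      traits.any (fun t => rule.2.any (fun tok => PySem.Str.isIn tok t))
      || (noise == rule.1 && (rule.1 == "quiet" || rule.1 == "social")))).map Prod.fst
  if labels = [] then ["friendly"] else labels

-- ===== PRECONDITION & SPEC =====
def Spec_normalize_student_traits_py (raw_traits : List String) (noise_preference : String) (out : List String) : Prop := out = normalize_student_traits_py_alt raw_traits noise_preference
instance (raw_traits : List String) (noise_preference : String) (out : List String) : Decidable (Spec_normalize_student_traits_py raw_traits noise_preference out) := by unfold Spec_normalize_student_traits_py; infer_instance

-- ===== CLAIM (what is proved, stated in full; the proofs are below) =====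
def Claim_equal_normalize_student_traits_py : Prop := ∀ (raw_traits : List String) (noise_preference : String), Dom_normalize_student_traits_py raw_traits noise_preference → Spec_normalize_student_traits_py raw_traits noise_preference (normalize_student_traits_py raw_traits noise_preference)

-- ===== LEMMAS AND PROOFS =====

-- one cleaned raw trait is non-empty and matched by one of the tokens
def pvMatch (toks : List String) (r : String) : Bool :=
  let t := PySem.Str.lower (pvCleanText r)
  !(t == "") && pvTokAny toks t

lemma mem_condAdd (s : PySem.Set String) (c : Bool) (x l : String) :
    l ∈ pvCondAdd s c x ↔ l ∈ s ∨ (l = x ∧ c = true) := by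
  unfold pvCondAdd
  split_ifs with h <;> simp [PySem.Set.mem_add, h]

lemma mem_ite_add (c : Prop) [Decidable c] (s : PySem.Set String) (x l : String) :
    l ∈ (if c then s.add x else s) ↔ l ∈ s ∨ (l = x ∧ c) := by
  split_ifs with h <;> simp [PySem.Set.mem_add, h]

lemma mem_stepA (s : PySem.Set String) (r : String) (l : String) :
    l ∈ pvStepA s r ↔ l ∈ s
      ∨ (l = "clean" ∧ pvMatch ["clean", "tidy", "chore"] r = true)
      ∨ (l = "quiet" ∧ pvMatch ["quiet", "study", "weeknight"] r = true)
      ∨ (l = "social" ∧ pvMatch ["social", "music-friendly", "outgoing"] r = true)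
      ∨ (l = "respectful" ∧ pvMatch ["respect", "privacy"] r = true)
      ∨ (l = "organized" ∧ pvMatch ["organ", "communicat", "budget"] r = true)
      ∨ (l = "friendly" ∧ pvMatch ["friendly", "easy"] r = true) := by
  simp only [pvStepA]
  by_cases h : PySem.Str.lower (pvCleanText r) = ""
  · simp [h, pvMatch]
  · have hm : ∀ toks, pvMatch toks r = pvTokAny toks (PySem.Str.lower (pvCleanText r)) := by
      intro toks; simp [pvMatch, h]
    rw [if_neg h]
    simp only [mem_condAdd]
    simp only [hm]
    simp only [or_assoc]

lemma fold_clean (raw : List String) (s : PySem.Set String) :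
    "clean" ∈ raw.foldl pvStepA s ↔ "clean" ∈ s ∨ raw.any (pvMatch ["clean", "tidy", "chore"]) = true := by
  induction raw generalizing s with
  | nil => simp
  | cons r rest ih =>
    simp only [List.foldl_cons, List.any_cons, ih, mem_stepA, Bool.or_eq_true]
    simp only [String.reduceEq, false_and, or_false, true_and, or_assoc]

lemma fold_quiet (raw : List String) (s : PySem.Set String) :
    "quiet" ∈ raw.foldl pvStepA s ↔ "quiet" ∈ s ∨ raw.any (pvMatch ["quiet", "study", "weeknight"]) = true := by
  induction raw generalizing s with
  | nil => simp
  | cons r rest ih =>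
    simp only [List.foldl_cons, List.any_cons, ih, mem_stepA, Bool.or_eq_true]
    simp only [String.reduceEq, false_and, false_or, true_and, or_assoc]

lemma fold_social (raw : List String) (s : PySem.Set String) :
    "social" ∈ raw.foldl pvStepA s ↔ "social" ∈ s ∨ raw.any (pvMatch ["social", "music-friendly", "outgoing"]) = true := by
  induction raw generalizing s with
  | nil => simp
  | cons r rest ih =>
    simp only [List.foldl_cons, List.any_cons, ih, mem_stepA, Bool.or_eq_true]
    simp only [String.reduceEq, false_and, or_false, false_or, true_and, or_assoc]

lemma fold_respectful (raw : List String) (s : PySem.Set String) :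
    "respectful" ∈ raw.foldl pvStepA s ↔ "respectful" ∈ s ∨ raw.any (pvMatch ["respect", "privacy"]) = true := by
  induction raw generalizing s with
  | nil => simp
  | cons r rest ih =>
    simp only [List.foldl_cons, List.any_cons, ih, mem_stepA, Bool.or_eq_true]
    simp only [String.reduceEq, false_and, or_false, false_or, true_and, or_assoc]

lemma fold_organized (raw : List String) (s : PySem.Set String) :
    "organized" ∈ raw.foldl pvStepA s ↔ "organized" ∈ s ∨ raw.any (pvMatch ["organ", "communicat", "budget"]) = true := by
  induction raw generalizing s with
  | nil => simp
  | cons r rest ih =>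
    simp only [List.foldl_cons, List.any_cons, ih, mem_stepA, Bool.or_eq_true]
    simp only [String.reduceEq, false_and, or_false, false_or, true_and, or_assoc]

lemma fold_friendly (raw : List String) (s : PySem.Set String) :
    "friendly" ∈ raw.foldl pvStepA s ↔ "friendly" ∈ s ∨ raw.any (pvMatch ["friendly", "easy"]) = true := by
  induction raw generalizing s with
  | nil => simp
  | cons r rest ih =>
    simp only [List.foldl_cons, List.any_cons, ih, mem_stepA, Bool.or_eq_true]
    simp only [String.reduceEq, false_and, false_or, true_and, or_assoc]

lemma fold_subset (raw : List String) (s : PySem.Set String) (l : String)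
    (h : l ∈ raw.foldl pvStepA s) :
    l ∈ s ∨ l ∈ (["clean", "quiet", "social", "respectful", "organized", "friendly"] : List String) := by
  induction raw generalizing s with
  | nil => exact Or.inl h
  | cons r rest ih =>
    rw [List.foldl_cons] at h
    rcases ih (pvStepA s r) h with h' | h'
    · rcases (mem_stepA s r l).1 h' with h3 | ⟨rfl, -⟩ | ⟨rfl, -⟩ | ⟨rfl, -⟩ | ⟨rfl, -⟩ | ⟨rfl, -⟩ | ⟨rfl, -⟩
      · exact Or.inl h3
      all_goals simp
    · exact Or.inr h'

lemma contains_eq (s : PySem.Set String) (x : String) (b : Bool) (h : x ∈ s ↔ b = true) :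
    PySem.Set.contains s x = b := by
  by_cases hm : x ∈ s
  · rw [(PySem.Set.contains_iff s x).mpr hm, h.mp hm]
  · have hb : PySem.Set.contains s x = false := by
      cases hcb : PySem.Set.contains s x
      · rfl
      · exact absurd ((PySem.Set.contains_iff s x).mp hcb) hm
    have hbf : b = false := by
      cases hb2 : b
      · rfl
      · exact absurd (h.mpr hb2) hm
    rw [hb, hbf]

lemma any_traits (raw : List String) (toks : List String) :
    ((raw.map (fun r => PySem.Str.lower (PySem.Str.strip r))).filter (fun t => !(t == ""))).any
        (fun t => toks.any (fun tok => PySem.Str.isIn tok t))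
      = raw.any (pvMatch toks) := by
  simp only [List.any_filter, List.any_map]
  have hfun : ((fun t => !(t == "") && toks.any fun tok => PySem.Str.isIn tok t) ∘
      fun r => PySem.Str.lower (PySem.Str.strip r)) = pvMatch toks := by
    funext a
    simp [pvMatch, pvTokAny, pvCleanText, Function.comp, PySem.Str.isIn]
  rw [hfun]

-- the common label chain both reduced programs compute
def pvChain (b1 b2 b3 b4 b5 b6 : Bool) : List String :=
  (if b1 then ["clean"] else []) ++
  ((if b2 then ["quiet"] else []) ++
  ((if b5 then ["organized"] else []) ++
  ((if b6 then ["friendly"] else []) ++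
  ((if b3 then ["social"] else []) ++
   (if b4 then ["respectful"] else [])))))

lemma chain_ne_nil (b1 b2 b3 b4 b5 b6 : Bool)
    (h : (b1 || b2 || b3 || b4 || b5 || b6) = true) :
    pvChain b1 b2 b3 b4 b5 b6 ≠ ([] : List String) := by
  revert h
  cases b1 <;> cases b2 <;> cases b3 <;> cases b4 <;> cases b5 <;> cases b6 <;> decide

lemma map_ite_singleton {α β : Type} (f : α → β) (c : Prop) [Decidable c] (x : α) :
    List.map f (if c then [x] else []) = (if c then [f x] else []) := by
  split_ifs <;> simp

lemma filter_cons_append {α : Type} (p : α → Bool) (x : α) (l : List α) :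
    (x :: l).filter p = (if p x = true then [x] else []) ++ l.filter p := by
  simp only [List.filter_cons]
  split_ifs <;> simp

lemma B_reduce (raw : List String) (np : String) :
    normalize_student_traits_py_alt raw np =
      (if pvChain (raw.any (pvMatch ["clean", "tidy", "chore"]))
            (raw.any (pvMatch ["quiet", "study", "weeknight"]) || (PySem.Str.lower (PySem.Str.strip np) == "quiet"))
            (raw.any (pvMatch ["social", "music-friendly", "outgoing"]) || (PySem.Str.lower (PySem.Str.strip np) == "social"))
            (raw.any (pvMatch ["respect", "privacy"]))
            (raw.any (pvMatch ["organ", "communicat", "budget"]))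
            (raw.any (pvMatch ["friendly", "easy"])) = [] then ["friendly"]
       else pvChain (raw.any (pvMatch ["clean", "tidy", "chore"]))
            (raw.any (pvMatch ["quiet", "study", "weeknight"]) || (PySem.Str.lower (PySem.Str.strip np) == "quiet"))
            (raw.any (pvMatch ["social", "music-friendly", "outgoing"]) || (PySem.Str.lower (PySem.Str.strip np) == "social"))
            (raw.any (pvMatch ["respect", "privacy"]))
            (raw.any (pvMatch ["organ", "communicat", "budget"]))
            (raw.any (pvMatch ["friendly", "easy"]))) := by
  simp only [normalize_student_traits_py_alt, pvRules, filter_cons_append, List.filter_nil,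
    List.append_nil, List.map_append, any_traits]
  simp only [map_ite_singleton]
  simp only [String.reduceBEq, Bool.or_false, Bool.or_true,
    Bool.and_false, Bool.and_true, pvChain]

-- ===== VERDICT (by name: the statement is the Claim_ definition above) =====
theorem normalize_student_traits_py_spec : Claim_equal_normalize_student_traits_py := by
  unfold Claim_equal_normalize_student_traits_py
  intro raw np _
  unfold Spec_normalize_student_traits_py
  rw [B_reduce]
  simp only [normalize_student_traits_py]
  set t := PySem.Str.lower (PySem.Str.strip np) with ht
  set B1 := raw.any (pvMatch ["clean", "tidy", "chore"]) with hB1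
  set B2 := raw.any (pvMatch ["quiet", "study", "weeknight"]) with hB2
  set B3 := raw.any (pvMatch ["social", "music-friendly", "outgoing"]) with hB3
  set B4 := raw.any (pvMatch ["respect", "privacy"]) with hB4
  set B5 := raw.any (pvMatch ["organ", "communicat", "budget"]) with hB5
  set B6 := raw.any (pvMatch ["friendly", "easy"]) with hB6
  set S0 := raw.foldl pvStepA PySem.Set.empty with hS0
  set S1 := (if t = "quiet" then S0.add "quiet" else S0) with hS1
  set S2 := (if t = "social" then S1.add "social" else S1) with hS2
  have hmc : "clean" ∈ S2 ↔ B1 = true := by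
    rw [hS2, hS1, hS0, hB1]
    simp only [mem_ite_add, fold_clean]
    simp [PySem.Set.empty]
  have hmq : "quiet" ∈ S2 ↔ (B2 || (t == "quiet")) = true := by
    rw [hS2, hS1, hS0, hB2]
    simp only [mem_ite_add, fold_quiet]
    simp [PySem.Set.empty, Bool.or_eq_true, beq_iff_eq]
  have hms : "social" ∈ S2 ↔ (B3 || (t == "social")) = true := by
    rw [hS2, hS1, hS0, hB3]
    simp only [mem_ite_add, fold_social]
    simp [PySem.Set.empty, Bool.or_eq_true, beq_iff_eq]
  have hmr : "respectful" ∈ S2 ↔ B4 = true := by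
    rw [hS2, hS1, hS0, hB4]
    simp only [mem_ite_add, fold_respectful]
    simp [PySem.Set.empty]
  have hmo : "organized" ∈ S2 ↔ B5 = true := by
    rw [hS2, hS1, hS0, hB5]
    simp only [mem_ite_add, fold_organized]
    simp [PySem.Set.empty]
  have hmf : "friendly" ∈ S2 ↔ B6 = true := by
    rw [hS2, hS1, hS0, hB6]
    simp only [mem_ite_add, fold_friendly]
    simp [PySem.Set.empty]
  by_cases hemp : S2 = []
  · have h1 : B1 = false := by
      rw [hemp] at hmc; simpa using hmc
    have h2 : (B2 || (t == "quiet")) = false := by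
      rw [hemp] at hmq; simpa using hmq
    have h3 : (B3 || (t == "social")) = false := by
      rw [hemp] at hms; simpa using hms
    have h4 : B4 = false := by
      rw [hemp] at hmr; simpa using hmr
    have h5 : B5 = false := by
      rw [hemp] at hmo; simpa using hmo
    have h6 : B6 = false := by
      rw [hemp] at hmf; simpa using hmf
    rw [if_pos hemp, hemp, h1, h2, h3, h4, h5, h6]
    decide
  · have hne : ((((B1 || (B2 || (t == "quiet"))) || (B3 || (t == "social"))) || B4 || B5) || B6) = true := by
      obtain ⟨l, hl⟩ := List.exists_mem_of_ne_nil S2 hemp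
      have hl6 : l ∈ (["clean", "quiet", "social", "respectful", "organized", "friendly"] : List String) := by
        rw [hS2, hS1] at hl
        simp only [mem_ite_add] at hl
        rcases hl with (hl0 | ⟨rfl, -⟩) | ⟨rfl, -⟩
        · rcases fold_subset raw PySem.Set.empty l (hS0 ▸ hl0) with h' | h'
          · simp [PySem.Set.empty] at h'
          · exact h'
        · simp
        · simp
      simp only [List.mem_cons, List.not_mem_nil, or_false] at hl6
      rcases hl6 with rfl | rfl | rfl | rfl | rfl | rfl
      · simp [hmc.mp hl]
      · simp [hmq.mp hl]
      · simp [hms.mp hl]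
      · simp [hmr.mp hl]
      · simp [hmo.mp hl]
      · simp [hmf.mp hl]
    have hcc : S2.contains "clean" = B1 := contains_eq _ _ _ hmc
    have hcq : S2.contains "quiet" = (B2 || (t == "quiet")) := contains_eq _ _ _ hmq
    have hcs : S2.contains "social" = (B3 || (t == "social")) := contains_eq _ _ _ hms
    have hcr : S2.contains "respectful" = B4 := contains_eq _ _ _ hmr
    have hco : S2.contains "organized" = B5 := contains_eq _ _ _ hmo
    have hcf : S2.contains "friendly" = B6 := contains_eq _ _ _ hmf
    have hce : S2.contains "early-riser" = false := by
      apply contains_eq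
      constructor
      · intro hl
        exfalso
        rw [hS2, hS1] at hl
        simp only [mem_ite_add] at hl
        rcases hl with (hl0 | ⟨h', -⟩) | ⟨h', -⟩
        · rcases fold_subset raw PySem.Set.empty _ (hS0 ▸ hl0) with h' | h' <;>
            simp [PySem.Set.empty] at h'
        · simp at h'
        · simp at h'
      · intro h'; simp at h'
    have hcn : S2.contains "night-owl" = false := by
      apply contains_eq
      constructor
      · intro hl
        exfalso
        rw [hS2, hS1] at hl
        simp only [mem_ite_add] at hl
        rcases hl with (hl0 | ⟨h', -⟩) | ⟨h', -⟩
        · rcases fold_subset raw PySem.Set.empty _ (hS0 ▸ hl0) with h' | h' <;>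
            simp [PySem.Set.empty] at h'
        · simp at h'
        · simp at h'
      · intro h'; simp at h'
    rw [if_neg hemp, if_neg (chain_ne_nil _ _ _ _ _ _ hne)]
    simp only [filter_cons_append, List.filter_nil, List.append_nil,
      hcc, hcq, hcs, hcr, hco, hcf, hce, hcn, pvChain]
    simp
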